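-- pv_equiv track=rewrite | github.com/j-mroz/Algorithms-leetcode | codility/lessons/17_dynamic_programming/min_abs_sum.py | solution
-- ===== SOURCE A (Python) =====
-- def solution(A):
--
--     if len(A) == 0:
--         return 0
--
--     A = [abs(a) for a in A]
--     results = {A[0]}
--     max_new_sum = max(A) ** 2
--
--     # Facts:
--     # (1) If the array has only unique absolute numbers then max sum must be
--     # less than M ** 2, where M == max(A) (actually M*(M-1)/2).
--     # If there are repetitions of new_sums, then actual sum is higher,
--     # but two repetitions negates each other (note: you choose sign for each value).
--     # Thus M ** 2 will be max partial sum we're willing to consider.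
--     # (2) There is always a total sum less or equal to 100.
--     # (3) That sum can be reached by adding or substracting values from
--     # smallers problem that has sum less than M*(M-1)/2) + 1.
--
--     for i in range(1, len(A)):
--         new_results = set()
--         for prev_sum in results:
--             new_sum = abs(prev_sum + A[i])
--             if new_sum < max_new_sum:
--                 new_results.add(new_sum)
--             new_sum = abs(prev_sum - A[i])
--             if new_sum < max_new_sum:
--                 new_results.add(new_sum)
--         results = new_results
--
--     if results:
--         return min(results)
--
--     # unreachable if input is valid
--     return -1
-- ===== SOURCE B (Python) =====
-- def solution(A):
--     # Top-down minimisation over the same pruned state graph: depth-first search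
--     # with memoisation (explicit stack, so long inputs do not hit the recursion limit),
--     # returning the minimum reachable final value directly instead of building
--     # per-level frontier sets and scanning them for the minimum at the end.
--     if not A:
--         return 0
--     vals = [abs(x) for x in A]
--     n = len(vals)
--     cutoff = max(vals) ** 2
--     memo = {}
--     todo = [("eval", 1, vals[0], 0)]
--     results = []  # value stack: minimum final value below each finished node, None = dead end
--     while todo:
--         tag, i, s, k = todo.pop()
--         if tag == "eval":
--             if i == n:
--                 results.append(s)
--             elif (i, s) in memo:
--                 results.append(memo[(i, s)])
--             else:
--                 kids = [t for t in (abs(s + vals[i]), abs(s - vals[i])) if t < cutoff]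
--                 todo.append(("comb", i, s, len(kids)))
--                 for t in kids:
--                     todo.append(("eval", i + 1, t, 0))
--         else:
--             vs = [v for v in results[len(results) - k:] if v is not None]
--             del results[len(results) - k:]
--             best = min(vs) if vs else None
--             memo[(i, s)] = best
--             results.append(best)
--     r = results.pop()
--     return -1 if r is None else r
-- ===== Notes on version B (the rewrite author's own statement) =====
-- stated objective: alternative
-- what changed: B replaces A's level-by-level reachable-frontier iteration (a set rebuilt per element, minimum scanned at the end) by a top-down depth-first search with memoisation over the same pruned state graph, run on an explicit stack and returning the minimum reachable final value directly.
import Mathlib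
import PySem

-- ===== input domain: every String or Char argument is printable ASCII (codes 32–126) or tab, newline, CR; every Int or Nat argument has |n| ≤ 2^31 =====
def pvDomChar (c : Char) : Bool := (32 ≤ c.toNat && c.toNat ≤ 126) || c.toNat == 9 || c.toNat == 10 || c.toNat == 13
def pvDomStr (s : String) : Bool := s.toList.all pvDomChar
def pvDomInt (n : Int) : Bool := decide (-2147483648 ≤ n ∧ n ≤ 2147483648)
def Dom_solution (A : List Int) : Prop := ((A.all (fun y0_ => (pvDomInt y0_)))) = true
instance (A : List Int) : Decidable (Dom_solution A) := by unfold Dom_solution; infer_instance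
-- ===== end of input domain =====

-- B replaces A's level-by-level frontier-set iteration (and final min scan) by a top-down
-- depth-first search with memoisation over the same pruned state graph (explicit stack,
-- so long inputs do not hit Python's recursion limit), returning the minimum directly.

-- ===== PORT A =====
-- inner loop 'for prev_sum in results: …' (building new_results from the set results)
def astep (c a : Int) (results : PySem.Set Int) : PySem.Set Int :=
  results.foldl (fun nr s =>
    let nr1 := if |s + a| < c then PySem.Set.add nr |s + a| else nr
    if |s - a| < c then PySem.Set.add nr1 |s - a| else nr1) PySem.Set.empty

def solution (A : List Int) : Int :=
  if A.length = 0 then 0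
  else
    let A' := A.map (fun a => |a|)
    let maxNewSum := ((PySem.List.max? A' (fun x => x)).getD 0) ^ 2
    let results0 : PySem.Set Int := PySem.Set.add PySem.Set.empty (PySem.List.pyGetD A' 0 0)
    let results := (PySem.List.pyRange 1 (A'.length : Int) 1).foldl
      (fun results i => astep maxNewSum (PySem.List.pyGetD A' i 0) results) results0
    match PySem.List.min? results (fun x => x) with
    | some m => m
    | none => -1

-- ===== PORT B =====
-- stack frames of Source B's explicit-stack DFS: ("eval", i, s, 0) and ("comb", i, s, k)
inductive BFrame where
  | eval : Nat → Int → BFrame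
  | comb : Nat → Int → Nat → BFrame
deriving DecidableEq, Repr

-- '[t for t in (abs(s + vals[i]), abs(s - vals[i])) if t < cutoff]'
def bkids (c a s : Int) : List Int := [|s + a|, |s - a|].filter (fun t => decide (t < c))

-- one iteration of Source B's 'while todo:' loop body (pop one frame, push its effect)
def bstep1 (vals : List Int) (n : Nat) (c : Int) :
    BFrame → List BFrame → List (Option Int) → PySem.Dict (Nat × Int) (Option Int)
      → List BFrame × List (Option Int) × PySem.Dict (Nat × Int) (Option Int)
  | BFrame.eval i s, rest, res, memo =>
    if i = n then (rest, some s :: res, memo)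
    else
      match memo.get? (i, s) with
      | some v => (rest, v :: res, memo)
      | none =>
        if i < n then
          let kids := bkids c (PySem.List.pyGetD vals (i : Int) 0) s
          (kids.foldl (fun td t => BFrame.eval (i + 1) t :: td)
            (BFrame.comb i s kids.length :: rest), res, memo)
        else (rest, none :: res, memo)
  | BFrame.comb i s k, rest, res, memo =>
    let vs := (res.take k).filterMap id
    let best := PySem.List.min? vs (fun x => x)
    (rest, best :: res.drop k, memo.insert (i, s) best)

-- the 'while todo:' loop of Source B; todo/results are stacks with the top at the head
-- (python appends/pops at the end); the fuel argument is a totality guard only —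
-- the loop is proved below to finish long before 3 ^ (len(vals) + 1) iterations
def brun (vals : List Int) (n : Nat) (c : Int) :
    Nat → List BFrame → List (Option Int) → PySem.Dict (Nat × Int) (Option Int)
      → List (Option Int)
  | 0, _, res, _ => res
  | _ + 1, [], res, _ => res
  | fuel + 1, f :: rest, res, memo =>
    let st := bstep1 vals n c f rest res memo
    brun vals n c fuel st.1 st.2.1 st.2.2

def solution_alt (A : List Int) : Int :=
  if A = [] then 0
  else
    let vals := A.map (fun a => |a|)
    let n := vals.length
    let cutoff := ((PySem.List.max? vals (fun x => x)).getD 0) ^ 2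
    let res := brun vals n cutoff (3 ^ (n + 1)) [BFrame.eval 1 (PySem.List.pyGetD vals 0 0)] [] PySem.Dict.empty
    match res with
    | r :: _ => match r with | some m => m | none => -1
    | [] => -1

-- ===== PRECONDITION & SPEC =====
def Spec_solution (A : List Int) (out : Int) : Prop := out = solution_alt A
instance (A : List Int) (out : Int) : Decidable (Spec_solution A out) := by unfold Spec_solution; infer_instance

-- ===== CLAIM (what is proved, stated in full; the proofs are below) =====
def Claim_equal_solution : Prop := ∀ (A : List Int), Dom_solution A → Spec_solution A (solution A)

-- ===== LEMMAS AND PROOFS =====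

-- weight of a stack frame / a stack: strictly decreases at every loop iteration,
-- so the stated fuel is never exhausted
def bweight (n : Nat) : BFrame → Nat
  | .eval i _ => 3 ^ (n + 1 - i)
  | .comb _ _ _ => 1

lemma bweight_pos (n : Nat) (f : BFrame) : 1 ≤ bweight n f := by
  cases f with
  | eval i s => exact Nat.one_le_pow _ _ (by norm_num)
  | comb i s k => exact le_refl 1

lemma bpush_sum (n : Nat) (j : Nat) (ks : List Int) :
    ∀ base : List BFrame,
      ((ks.foldl (fun td t => BFrame.eval j t :: td) base).map (bweight n)).sum
        = ks.length * 3 ^ (n + 1 - j) + ((base.map (bweight n)).sum) := by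
  induction ks with
  | nil => intro base; simp
  | cons t ts ih =>
    intro base
    rw [List.foldl_cons, ih (BFrame.eval j t :: base)]
    simp [bweight]
    ring

lemma bdec_eval (n i : Nat) (s : Int) (rest : List BFrame) :
    ((rest.map (bweight n)).sum) < (((BFrame.eval i s :: rest).map (bweight n)).sum) := by
  simp only [List.map_cons, List.sum_cons]
  have h3 := bweight_pos n (BFrame.eval i s)
  omega

lemma bdec_comb (n i : Nat) (s : Int) (k : Nat) (rest : List BFrame) :
    ((rest.map (bweight n)).sum) < (((BFrame.comb i s k :: rest).map (bweight n)).sum) := by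
  simp only [bweight, List.map_cons, List.sum_cons]
  omega

lemma bdec_expand (n i : Nat) (s : Int) (rest : List BFrame) (h : i < n)
    {ks : List Int} (hk : ks.length ≤ 2) :
    (((ks.foldl (fun td t => BFrame.eval (i + 1) t :: td)
        (BFrame.comb i s ks.length :: rest)).map (bweight n)).sum)
      < (((BFrame.eval i s :: rest).map (bweight n)).sum) := by
  rw [bpush_sum]
  have hQ3 : 3 ≤ 3 ^ (n - i) := by
    calc (3 : Nat) = 3 ^ 1 := (pow_one 3).symm
    _ ≤ 3 ^ (n - i) := Nat.pow_le_pow_right (by norm_num) (by omega)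
  have h1 : n + 1 - (i + 1) = n - i := by omega
  have h2 : n + 1 - i = (n - i) + 1 := by omega
  simp only [bweight, List.map_cons, List.sum_cons, h1, h2, pow_succ]
  have hm : ks.length * 3 ^ (n - i) ≤ 2 * 3 ^ (n - i) := Nat.mul_le_mul_right _ hk
  omega

lemma bstep1_dec (vals : List Int) (n : Nat) (c : Int) (f : BFrame) (rest : List BFrame)
    (res : List (Option Int)) (memo : PySem.Dict (Nat × Int) (Option Int)) :
    (((bstep1 vals n c f rest res memo).1.map (bweight n)).sum)
      < (((f :: rest).map (bweight n)).sum) := by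
  cases f with
  | eval i s =>
    by_cases h1 : i = n
    · simp only [bstep1, if_pos h1]
      exact bdec_eval n i s rest
    · cases hm : memo.get? (i, s) with
      | some v =>
        simp only [bstep1, if_neg h1, hm]
        exact bdec_eval n i s rest
      | none =>
        by_cases h2 : i < n
        · simp only [bstep1, if_neg h1, hm, if_pos h2]
          exact bdec_expand n i s rest h2 (le_trans (List.length_filter_le _ _) (by simp))
        · simp only [bstep1, if_neg h1, hm, if_neg h2]
          exact bdec_eval n i s rest
  | comb i s k =>
    simp only [bstep1]
    exact bdec_comb n i s k rest

-- with enough fuel, the loop's result does not depend on the exact fuel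
lemma brun_fuel_eq (vals : List Int) (n : Nat) (c : Int) :
    ∀ (f1 f2 : Nat) (todo : List BFrame) (res : List (Option Int))
      (memo : PySem.Dict (Nat × Int) (Option Int)),
      ((todo.map (bweight n)).sum) < f1 → ((todo.map (bweight n)).sum) < f2 →
      brun vals n c f1 todo res memo = brun vals n c f2 todo res memo := by
  intro f1
  induction f1 with
  | zero => intro f2 todo res memo h1 _; exact absurd h1 (Nat.not_lt_zero _)
  | succ f1 ih =>
    intro f2 todo res memo h1 h2
    cases f2 with
    | zero => exact absurd h2 (Nat.not_lt_zero _)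
    | succ f2 =>
      cases todo with
      | nil => rfl
      | cons f rest =>
        rw [brun, brun]
        have hd := bstep1_dec vals n c f rest res memo
        exact ih f2 _ _ _ (by omega) (by omega)

-- the common mathematical description of both programs: minimum final value reachable
-- from pruned state s through the remaining elements (none = every path pruned)
def gmin (c : Int) : List Int → Int → Option Int
  | [], s => some s
  | a :: rest, s => PySem.List.min? ((bkids c a s).filterMap (gmin c rest)) (fun x => x)

lemma min_char (L : List Int) (m : Int) (hm : m ∈ L) (hmin : ∀ y ∈ L, m ≤ y) :
    PySem.List.min? L (fun x => x) = some m := by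
  cases hL : PySem.List.min? L (fun x => x) with
  | none =>
    rw [PySem.List.min?_eq_none_iff] at hL
    subst hL; simp at hm
  | some m' =>
    have h1 := PySem.List.min?_mem hL
    have h2 := PySem.List.min?_isMin hL
    have : m = m' := le_antisymm (hmin m' h1) (h2 m hm)
    rw [this]

lemma mem_astep_body (c a : Int) (nr : PySem.Set Int) (s x : Int) :
    (x ∈ (let nr1 := if |s + a| < c then PySem.Set.add nr |s + a| else nr;
          if |s - a| < c then PySem.Set.add nr1 |s - a| else nr1))
    ↔ x ∈ nr ∨ ((x = |s + a| ∨ x = |s - a|) ∧ x < c) := by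
  by_cases h1 : |s + a| < c <;> by_cases h2 : |s - a| < c <;>
    simp only [h1, h2, if_true, if_false, PySem.Set.mem_add]
  · constructor
    · rintro ((h | rfl) | rfl)
      · exact Or.inl h
      · exact Or.inr ⟨Or.inl rfl, h1⟩
      · exact Or.inr ⟨Or.inr rfl, h2⟩
    · rintro (h | ⟨(rfl | rfl), _⟩)
      · exact Or.inl (Or.inl h)
      · exact Or.inl (Or.inr rfl)
      · exact Or.inr rfl
  · constructor
    · rintro (h | rfl)
      · exact Or.inl h
      · exact Or.inr ⟨Or.inl rfl, h1⟩
    · rintro (h | ⟨(rfl | rfl), hlt⟩)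
      · exact Or.inl h
      · exact Or.inr rfl
      · exact absurd hlt h2
  · constructor
    · rintro (h | rfl)
      · exact Or.inl h
      · exact Or.inr ⟨Or.inr rfl, h2⟩
    · rintro (h | ⟨(rfl | rfl), hlt⟩)
      · exact Or.inl h
      · exact absurd hlt h1
      · exact Or.inr rfl
  · constructor
    · exact Or.inl
    · rintro (h | ⟨(rfl | rfl), hlt⟩)
      · exact h
      · exact absurd hlt h1
      · exact absurd hlt h2

lemma mem_astep_foldl (c a : Int) (l : List Int) (acc : PySem.Set Int) (x : Int) :
    x ∈ l.foldl (fun nr s =>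
      let nr1 := if |s + a| < c then PySem.Set.add nr |s + a| else nr
      if |s - a| < c then PySem.Set.add nr1 |s - a| else nr1) acc
    ↔ x ∈ acc ∨ ∃ s ∈ l, (x = |s + a| ∨ x = |s - a|) ∧ x < c := by
  induction l generalizing acc with
  | nil => simp
  | cons s t ih =>
    rw [List.foldl_cons, ih, mem_astep_body c a acc s x]
    simp only [List.mem_cons]
    constructor
    · rintro ((h | h) | ⟨u, hu, h⟩)
      · exact Or.inl h
      · exact Or.inr ⟨s, Or.inl rfl, h⟩
      · exact Or.inr ⟨u, Or.inr hu, h⟩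
    · rintro (h | ⟨u, (rfl | hu), h⟩)
      · exact Or.inl (Or.inl h)
      · exact Or.inl (Or.inr h)
      · exact Or.inr ⟨u, hu, h⟩

lemma mem_astep (c a : Int) (S : PySem.Set Int) (x : Int) :
    x ∈ astep c a S ↔ ∃ s ∈ S, x ∈ bkids c a s := by
  unfold astep
  rw [mem_astep_foldl]
  simp [PySem.Set.empty, bkids, List.mem_filter]

-- min over the union of the children equals min of the per-parent minima
lemma min_union (c a : Int) (S : List Int) (f : Int → Option Int) :
    PySem.List.min? ((astep c a S).filterMap f) (fun x => x)
      = PySem.List.min?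
          (S.filterMap (fun s => PySem.List.min? ((bkids c a s).filterMap f) (fun x => x)))
          (fun x => x) := by
  set L1 := (astep c a S).filterMap f with hL1
  set L2 := S.filterMap (fun s => PySem.List.min? ((bkids c a s).filterMap f) (fun x => x))
    with hL2
  have hsub : ∀ w ∈ L2, w ∈ L1 := by
    intro w hw
    rw [hL2, List.mem_filterMap] at hw
    obtain ⟨s, hs, hmin⟩ := hw
    have hmem := PySem.List.min?_mem hmin
    rw [List.mem_filterMap] at hmem
    obtain ⟨t, ht, hft⟩ := hmem
    rw [hL1, List.mem_filterMap]
    exact ⟨t, (mem_astep c a S t).mpr ⟨s, hs, ht⟩, hft⟩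
  have hdom : ∀ v ∈ L1, ∃ w ∈ L2, w ≤ v := by
    intro v hv
    rw [hL1, List.mem_filterMap] at hv
    obtain ⟨t, ht, hft⟩ := hv
    rw [mem_astep] at ht
    obtain ⟨s, hs, hts⟩ := ht
    have hvmem : v ∈ (bkids c a s).filterMap f := List.mem_filterMap.mpr ⟨t, hts, hft⟩
    cases hm : PySem.List.min? ((bkids c a s).filterMap f) (fun x => x) with
    | none =>
      rw [PySem.List.min?_eq_none_iff] at hm
      rw [hm] at hvmem; simp at hvmem
    | some w =>
      refine ⟨w, ?_, PySem.List.min?_isMin hm v hvmem⟩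
      rw [hL2, List.mem_filterMap]
      exact ⟨s, hs, hm⟩
  cases h1 : PySem.List.min? L1 (fun x => x) with
  | none =>
    rw [PySem.List.min?_eq_none_iff] at h1
    have : L2 = [] := by
      rw [List.eq_nil_iff_forall_not_mem]
      intro w hw
      have := hsub w hw
      rw [h1] at this; simp at this
    rw [this]
    rfl
  | some m =>
    have hmmem := PySem.List.min?_mem h1
    have hmmin := PySem.List.min?_isMin h1
    obtain ⟨w, hw2, hwm⟩ := hdom m hmmem
    have hw1 := hsub w hw2
    have : w = m := le_antisymm hwm (hmmin w hw1)
    subst this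
    exact (min_char L2 w hw2 (fun y hy => le_trans hwm (hmmin y (hsub y hy)))).symm

lemma frontier_min (c : Int) (rest : List Int) : ∀ S : List Int,
    PySem.List.min? (List.foldl (fun acc v => astep c v acc) S rest) (fun x => x)
      = PySem.List.min? (S.filterMap (gmin c rest)) (fun x => x) := by
  induction rest with
  | nil =>
    intro S
    have h0 : S.filterMap (gmin c []) = S := by
      simp [gmin]
    rw [h0, List.foldl_nil]
  | cons a rest ih =>
    intro S
    rw [List.foldl_cons, ih (astep c a S), min_union]
    rfl

-- A's result, expressed through gmin
lemma solution_eq_gmin (A : List Int) (h : A ≠ []) :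
    solution A =
      match gmin (((PySem.List.max? (A.map (fun a => |a|)) (fun x => x)).getD 0) ^ 2)
          ((A.map (fun a => |a|)).tail) (PySem.List.pyGetD (A.map (fun a => |a|)) 0 0) with
      | some m => m
      | none => -1 := by
  unfold solution
  rw [if_neg (by simpa using h)]
  dsimp only
  rw [PySem.List.foldl_pyRange_pyGetD' (A.map (fun a => |a|)) 0
    (fun acc v =>
      astep (((PySem.List.max? (A.map (fun a => |a|)) (fun x => x)).getD 0) ^ 2) v acc)
    (PySem.Set.add PySem.Set.empty (PySem.List.pyGetD (A.map (fun a => |a|)) 0 0))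
    (a := 1) (by norm_num)]
  rw [show ((1 : Int).toNat) = 1 from rfl, List.drop_one,
    show PySem.Set.add PySem.Set.empty (PySem.List.pyGetD (A.map (fun a => |a|)) 0 0)
      = [PySem.List.pyGetD (A.map (fun a => |a|)) 0 0] from rfl]
  rw [frontier_min]
  cases hg : gmin (((PySem.List.max? (A.map (fun a => |a|)) (fun x => x)).getD 0) ^ 2)
      ((A.map (fun a => |a|)).tail) (PySem.List.pyGetD (A.map (fun a => |a|)) 0 0) with
  | none =>
    rw [show ([PySem.List.pyGetD (A.map (fun a => |a|)) 0 0]).filterMap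
        (gmin (((PySem.List.max? (A.map (fun a => |a|)) (fun x => x)).getD 0) ^ 2)
          ((A.map (fun a => |a|)).tail)) = [] by simp [hg]]
    rfl
  | some m =>
    rw [show ([PySem.List.pyGetD (A.map (fun a => |a|)) 0 0]).filterMap
        (gmin (((PySem.List.max? (A.map (fun a => |a|)) (fun x => x)).getD 0) ^ 2)
          ((A.map (fun a => |a|)).tail)) = [m] by simp [hg]]
    rw [min_char [m] m (by simp) (by simp)]

-- B's memo only ever stores correct gmin values
def MemoOK (vals : List Int) (c : Int) (memo : PySem.Dict (Nat × Int) (Option Int)) : Prop :=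
  ∀ i s v, memo.get? (i, s) = some v → v = gmin c (vals.drop i) s

lemma memoOK_insert (vals : List Int) (c : Int) (memo : PySem.Dict (Nat × Int) (Option Int))
    (i : Nat) (s : Int) (v : Option Int) (hok : MemoOK vals c memo)
    (hv : v = gmin c (vals.drop i) s) : MemoOK vals c (memo.insert (i, s) v) := by
  intro j u w hw
  by_cases hk : (j, u) = (i, s)
  · rw [hk, PySem.Dict.get?_insert_self] at hw
    cases hk
    cases hw
    exact hv
  · rw [PySem.Dict.get?_insert_of_ne _ _ hk] at hw
    exact hok j u w hw

lemma brun_eval (vals : List Int) (c : Int) :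
    ∀ (k i : Nat) (s : Int) (rest : List BFrame) (res : List (Option Int))
      (memo : PySem.Dict (Nat × Int) (Option Int)) (fuel f2 : Nat),
      MemoOK vals c memo → vals.length - i ≤ k → i ≤ vals.length →
      (((BFrame.eval i s :: rest).map (bweight vals.length)).sum) < fuel →
      ((rest.map (bweight vals.length)).sum) < f2 →
      ∃ memo', MemoOK vals c memo' ∧
        brun vals vals.length c fuel (BFrame.eval i s :: rest) res memo
          = brun vals vals.length c f2 rest (gmin c (vals.drop i) s :: res) memo' := by
  intro k
  induction k with
  | zero =>
    intro i s rest res memo fuel f2 hok hk hi hfuel hf2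
    have hin : i = vals.length := by omega
    subst hin
    cases fuel with
    | zero => exact absurd hfuel (Nat.not_lt_zero _)
    | succ fs =>
      refine ⟨memo, hok, ?_⟩
      rw [brun]
      simp only [bstep1]
      rw [List.drop_length]
      have hw := bweight_pos vals.length (BFrame.eval vals.length s)
      simp only [List.map_cons, List.sum_cons] at hfuel
      exact brun_fuel_eq vals vals.length c fs f2 rest _ memo (by omega) hf2
  | succ k ih =>
    intro i s rest res memo fuel f2 hok hk hi hfuel hf2
    cases fuel with
    | zero => exact absurd hfuel (Nat.not_lt_zero _)
    | succ fs =>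
      by_cases hin : i = vals.length
      · subst hin
        refine ⟨memo, hok, ?_⟩
        rw [brun]
        simp only [bstep1]
        rw [List.drop_length]
        have hw := bweight_pos vals.length (BFrame.eval vals.length s)
        simp only [List.map_cons, List.sum_cons] at hfuel
        exact brun_fuel_eq vals vals.length c fs f2 rest _ memo (by omega) hf2
      · have hlt : i < vals.length := by omega
        rw [brun]
        cases hmg : memo.get? (i, s) with
        | some v =>
          refine ⟨memo, hok, ?_⟩
          simp only [bstep1, if_neg hin, hmg]
          rw [hok i s v hmg]
          have hw := bweight_pos vals.length (BFrame.eval i s)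
          simp only [List.map_cons, List.sum_cons] at hfuel
          exact brun_fuel_eq vals vals.length c fs f2 rest _ memo (by omega) hf2
        | none =>
          simp only [bstep1, if_neg hin, hmg, if_pos hlt]
          have hdrop : vals.drop i = vals[i] :: vals.drop (i + 1) :=
            List.drop_eq_getElem_cons hlt
          have hget : PySem.List.pyGetD vals (i : Int) 0 = vals[i] := by
            rw [PySem.List.pyGetD_natCast]
            simp [hlt]
          have hgm : gmin c (vals.drop i) s
              = PySem.List.min?
                  ((bkids c (PySem.List.pyGetD vals (i : Int) 0) s).filterMap
                    (gmin c (vals.drop (i + 1)))) (fun x => x) := by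
            rw [hdrop, hget]
            rfl
          have hfuel' : (((BFrame.eval i s :: rest).map (bweight vals.length)).sum) < fs + 1 :=
            hfuel
          -- the child list has at most two elements: case on its shape
          rcases hsh : bkids c (PySem.List.pyGetD vals (i : Int) 0) s
            with _ | ⟨t1, _ | ⟨t2, rest2⟩⟩
          · -- no children
            have hb : (((BFrame.comb i s 0 :: rest).map (bweight vals.length)).sum)
                < (((BFrame.eval i s :: rest).map (bweight vals.length)).sum) := by
              have := bdec_expand vals.length i s rest hlt (ks := []) (by simp)
              simpa using this
            simp only [List.foldl_nil, List.length_nil]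
            have hc : (((BFrame.comb i s 0 :: rest).map (bweight vals.length)).sum) < fs := by
              omega
            cases fs with
            | zero => exact absurd hc (Nat.not_lt_zero _)
            | succ fs' =>
              rw [brun]
              simp only [bstep1]
              refine ⟨memo.insert (i, s)
                (PySem.List.min? ((res.take 0).filterMap id) (fun x => x)), ?_, ?_⟩
              · refine memoOK_insert _ _ _ _ _ _ hok ?_
                rw [hgm, hsh]
                rfl
              · simp only [List.take_zero, List.filterMap_nil, List.drop_zero]
                rw [hgm, hsh]
                simp only [List.filterMap_nil]
                have hr : (((BFrame.comb i s 0 :: rest).map (bweight vals.length)).sum)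
                    = 1 + ((rest.map (bweight vals.length)).sum) := by
                  simp [bweight]
                exact brun_fuel_eq vals vals.length c fs' f2 rest _ _ (by omega) hf2
          · -- one child
            simp only [List.foldl_cons, List.foldl_nil, List.length_cons, List.length_nil]
            have hb : (((BFrame.eval (i + 1) t1 :: BFrame.comb i s 1 :: rest).map
                (bweight vals.length)).sum)
                < (((BFrame.eval i s :: rest).map (bweight vals.length)).sum) := by
              have := bdec_expand vals.length i s rest hlt (ks := [t1]) (by simp)
              simpa using this
            have hcomb : (((BFrame.comb i s 1 :: rest).map (bweight vals.length)).sum)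
                < (((BFrame.eval (i + 1) t1 :: BFrame.comb i s 1 :: rest).map
                  (bweight vals.length)).sum) :=
              bdec_eval vals.length (i + 1) t1 _
            obtain ⟨memo1, hok1, heq1⟩ := ih (i + 1) t1
              (BFrame.comb i s 1 :: rest) res memo fs fs hok (by omega) (by omega)
              (by omega) (by omega)
            rw [heq1]
            have hc : (((BFrame.comb i s 1 :: rest).map (bweight vals.length)).sum) < fs := by
              omega
            cases fs with
            | zero => exact absurd hc (Nat.not_lt_zero _)
            | succ fs' =>
              rw [brun]
              simp only [bstep1]
              have hbest : PySem.List.min?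
                  (((gmin c (vals.drop (i + 1)) t1 :: res).take 1).filterMap id) (fun x => x)
                  = gmin c (vals.drop i) s := by
                rw [hgm, hsh]
                rcases hgv : gmin c (vals.drop (i + 1)) t1 with _ | v <;> simp [hgv]
              refine ⟨memo1.insert (i, s)
                (PySem.List.min?
                  (((gmin c (vals.drop (i + 1)) t1 :: res).take 1).filterMap id)
                  (fun x => x)), ?_, ?_⟩
              · exact memoOK_insert _ _ _ _ _ _ hok1 hbest
              · rw [hbest]
                have hr : (((BFrame.comb i s 1 :: rest).map (bweight vals.length)).sum)
                    = 1 + ((rest.map (bweight vals.length)).sum) := by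
                  simp [bweight]
                exact brun_fuel_eq vals vals.length c fs' f2 rest _ _ (by omega) hf2
          · -- two children
            cases rest2 with
            | cons _ _ =>
              -- impossible: bkids is a filter of a two-element list
              exfalso
              have h2 : (bkids c (PySem.List.pyGetD vals (i : Int) 0) s).length ≤ 2 := by
                unfold bkids
                exact le_trans (List.length_filter_le _ _) (by simp)
              rw [hsh] at h2
              simp at h2
            | nil =>
              simp only [List.foldl_cons, List.foldl_nil, List.length_cons, List.length_nil]
              have hb : (((BFrame.eval (i + 1) t2 :: BFrame.eval (i + 1) t1 ::
                  BFrame.comb i s 2 :: rest).map (bweight vals.length)).sum)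
                  < (((BFrame.eval i s :: rest).map (bweight vals.length)).sum) := by
                have := bdec_expand vals.length i s rest hlt (ks := [t1, t2]) (by simp)
                simpa using this
              have hb1 : (((BFrame.eval (i + 1) t1 :: BFrame.comb i s 2 :: rest).map
                  (bweight vals.length)).sum)
                  < (((BFrame.eval (i + 1) t2 :: BFrame.eval (i + 1) t1 ::
                    BFrame.comb i s 2 :: rest).map (bweight vals.length)).sum) :=
                bdec_eval vals.length (i + 1) t2 _
              have hcomb : (((BFrame.comb i s 2 :: rest).map (bweight vals.length)).sum)
                  < (((BFrame.eval (i + 1) t1 :: BFrame.comb i s 2 :: rest).map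
                    (bweight vals.length)).sum) :=
                bdec_eval vals.length (i + 1) t1 _
              obtain ⟨memo1, hok1, heq1⟩ := ih (i + 1) t2
                (BFrame.eval (i + 1) t1 :: BFrame.comb i s 2 :: rest) res memo fs fs hok
                (by omega) (by omega) (by omega) (by omega)
              rw [heq1]
              obtain ⟨memo2, hok2, heq2⟩ := ih (i + 1) t1
                (BFrame.comb i s 2 :: rest) (gmin c (vals.drop (i + 1)) t2 :: res) memo1 fs fs
                hok1 (by omega) (by omega) (by omega) (by omega)
              rw [heq2]
              have hc : (((BFrame.comb i s 2 :: rest).map (bweight vals.length)).sum)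
                  < fs := by omega
              cases fs with
              | zero => exact absurd hc (Nat.not_lt_zero _)
              | succ fs' =>
                rw [brun]
                simp only [bstep1]
                have hbest : PySem.List.min?
                    (((gmin c (vals.drop (i + 1)) t1 :: gmin c (vals.drop (i + 1)) t2 :: res).take 2).filterMap id)
                    (fun x => x)
                    = gmin c (vals.drop i) s := by
                  rw [hgm, hsh]
                  rcases hgv1 : gmin c (vals.drop (i + 1)) t1 with _ | v1 <;>
                    rcases hgv2 : gmin c (vals.drop (i + 1)) t2 with _ | v2 <;>
                    simp [hgv1, hgv2]
                refine ⟨memo2.insert (i, s)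
                  (PySem.List.min?
                    (((gmin c (vals.drop (i + 1)) t1 :: gmin c (vals.drop (i + 1)) t2 :: res).take 2).filterMap id)
                    (fun x => x)), ?_, ?_⟩
                · exact memoOK_insert _ _ _ _ _ _ hok2 hbest
                · rw [hbest]
                  have hr : (((BFrame.comb i s 2 :: rest).map (bweight vals.length)).sum)
                      = 1 + ((rest.map (bweight vals.length)).sum) := by
                    simp [bweight]
                  exact brun_fuel_eq vals vals.length c fs' f2 rest _ _ (by omega) hf2

lemma alt_eq_gmin (A : List Int) (h : A ≠ []) :
    solution_alt A =
      match gmin (((PySem.List.max? (A.map (fun a => |a|)) (fun x => x)).getD 0) ^ 2)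
          ((A.map (fun a => |a|)).tail) (PySem.List.pyGetD (A.map (fun a => |a|)) 0 0) with
      | some m => m
      | none => -1 := by
  unfold solution_alt
  rw [if_neg h]
  dsimp only
  have hne : (A.map (fun a => |a|)).length ≠ 0 := by simpa using h
  obtain ⟨memo', _, heq⟩ := brun_eval (A.map (fun a => |a|))
    (((PySem.List.max? (A.map (fun a => |a|)) (fun x => x)).getD 0) ^ 2)
    (A.map (fun a => |a|)).length 1 (PySem.List.pyGetD (A.map (fun a => |a|)) 0 0)
    [] [] PySem.Dict.empty (3 ^ ((A.map (fun a => |a|)).length + 1)) 1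
    (by intro i s v hv; simp [PySem.Dict.get?_empty] at hv)
    (by omega) (by omega)
    (by
      simp only [List.map_cons, List.map_nil, List.sum_cons, List.sum_nil, bweight]
      have h1 : (A.map (fun a => |a|)).length + 1 - 1 = (A.map (fun a => |a|)).length := by
        omega
      rw [h1]
      have h2 := Nat.pow_lt_pow_succ (a := 3) (n := (A.map (fun a => |a|)).length)
        (by norm_num)
      omega)
    (by simp)
  rw [heq, brun, List.drop_one]

-- ===== VERDICT (by name: the statement is the Claim_ definition above) =====
theorem solution_spec : Claim_equal_solution := by
  intro A _
  unfold Spec_solution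
  by_cases h : A = []
  · subst h
    rfl
  · rw [solution_eq_gmin A h, alt_eq_gmin A h]
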